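-- pv_equiv track=rewrite | github.com/tempifyOS/steganography-project | find runs test func thing v4.py | find_all_runs
-- ===== SOURCE A (Python) =====
-- def find_all_runs(s: str, M: int):
--     """
--     Finds all non-overlapping runs of at least length M in the binary string s.
--
--     Parameters:
--     - s (str): A string of '0's and '1's.
--     - M (int): The minimum length of a run.
--
--     Returns:
--     - list of tuples: Each tuple is (start_index, end_index, character) for a valid run.
--     """
--     if M <= 0:
--         raise ValueError("Minimum length M must be greater than 0.")
--
--     runs = []
--     i = 0
--     n = len(s)
--
--     while i < n:
--         run_char = s[i]
--         start = i
--         while i < n and s[i] == run_char: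
--             i += 1
--         run_length = i - start
--         if run_length >= M:
--             runs.append((start, i - 1, run_char))
--
--     return runs
-- ===== SOURCE B (Python) =====
-- def find_all_runs(s: str, M: int):
--     if M <= 0:
--         raise ValueError("Minimum length M must be greater than 0.")
--     n = len(s)
--     starts = [i for i in range(n) if i == 0 or s[i] != s[i - 1]]
--     ends = starts[1:] + [n]
--     return [(a, b - 1, s[a]) for a, b in zip(starts, ends) if b - a >= M]
-- ===== Notes on version B (the rewrite author's own statement) =====
-- stated objective: alternative
-- what changed: Instead of a pointer-advancing outer/inner while loop, B works in stages: it first computes the list of run-boundary positions by comparing each character with its predecessor, then pairs consecutive boundaries to form the runs and filters by length.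
import Mathlib
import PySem

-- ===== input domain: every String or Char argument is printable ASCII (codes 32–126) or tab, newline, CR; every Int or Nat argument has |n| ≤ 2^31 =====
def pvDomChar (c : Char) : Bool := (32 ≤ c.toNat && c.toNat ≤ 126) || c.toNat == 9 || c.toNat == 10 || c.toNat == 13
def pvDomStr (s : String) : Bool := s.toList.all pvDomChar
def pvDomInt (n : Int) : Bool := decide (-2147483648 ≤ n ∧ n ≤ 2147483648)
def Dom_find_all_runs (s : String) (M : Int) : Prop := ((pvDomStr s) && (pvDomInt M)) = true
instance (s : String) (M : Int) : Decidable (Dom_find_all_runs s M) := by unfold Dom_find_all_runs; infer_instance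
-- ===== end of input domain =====

-- B replaces A's pointer-advancing nested while loops with staged passes: first a list of
-- run-boundary positions (each index whose char differs from its predecessor), then pairing
-- consecutive boundaries and filtering by length (alternative decomposition; same cost).
-- Pre_ excludes M <= 0, on which A (and B) raise ValueError.


-- ===== PORT A =====
-- inner while loop: advance i while the current char equals run_char; returns (new i, rest of chars)
def pvInnerA (c : Char) (cs : List Char) (i : Int) : Int × List Char :=
  match cs with
  | [] => (i, [])
  | x :: rest => if x = c then pvInnerA c rest (i + 1) else (i, x :: rest)

theorem pvInnerA_len (c : Char) (cs : List Char) (i : Int) :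
    (pvInnerA c cs i).2.length ≤ cs.length := by
  induction cs generalizing i with
  | nil => simp [pvInnerA]
  | cons x rest ih =>
    simp only [pvInnerA]
    split
    · exact Nat.le_trans (ih _) (Nat.le_succ _)
    · simp

-- outer while loop over the remaining characters, carrying the index i
def pvOuterA (M : Int) (cs : List Char) (i : Int) : List (Int × Int × String) :=
  match cs with
  | [] => []
  | c :: rest =>
    let start := i
    let p := pvInnerA c (c :: rest) i
    let runLength := p.1 - start
    (if runLength ≥ M then [(start, p.1 - 1, String.ofList [c])] else []) ++ pvOuterA M p.2 p.1
termination_by cs.length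
decreasing_by
  simp only [pvInnerA]
  exact Nat.lt_succ_of_le (pvInnerA_len c rest (i + 1))

def find_all_runs (s : String) (M : Int) : List (Int × Int × String) :=
  pvOuterA M s.toList 0

-- ===== PORT B =====
-- starts = [i for i in range(n) if i == 0 or s[i] != s[i-1]]
def pvStarts (cs : List Char) : List Nat :=
  (List.range cs.length).filter (fun i => i == 0 || cs[i]? != cs[i-1]?)

-- [(a, b - 1, s[a]) for a, b in zip(starts, ends) if b - a >= M]
-- s[a]: every a in starts satisfies a < n, so the getD default is never read
def find_all_runs_alt (s : String) (M : Int) : List (Int × Int × String) :=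
  let cs := s.toList
  let starts := pvStarts cs
  let ends := starts.drop 1 ++ [cs.length]
  ((starts.zip ends).filter (fun p => (p.2 : Int) - (p.1 : Int) ≥ M)).map
    (fun p => ((p.1 : Int), (p.2 : Int) - 1, String.ofList [(cs[p.1]?).getD ' ']))

-- ===== PRECONDITION & SPEC =====
-- Pre_ excludes M ≤ 0: there A raises ValueError (no return value); B raises likewise.
def Pre_find_all_runs (s : String) (M : Int) : Prop := 1 ≤ M
instance (s : String) (M : Int) : Decidable (Pre_find_all_runs s M) := by unfold Pre_find_all_runs; infer_instance
def pvWitness_find_all_runs : String × Int := ("0011101", 2)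

def Spec_find_all_runs (s : String) (M : Int) (out : List (Int × Int × String)) : Prop := out = find_all_runs_alt s M
instance (s : String) (M : Int) (out : List (Int × Int × String)) : Decidable (Spec_find_all_runs s M out) := by unfold Spec_find_all_runs; infer_instance

-- ===== CLAIM (what is proved, stated in full; the proofs are below) =====
def Claim_equal_find_all_runs : Prop := ∀ (s : String) (M : Int), Dom_find_all_runs s M → Pre_find_all_runs s M → Spec_find_all_runs s M (find_all_runs s M)

-- ===== LEMMAS AND PROOFS =====
-- length of the leading run of c continuing into cs
def pvRunLen (c : Char) : List Char → Nat
  | [] => 0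
  | x :: rest => if x = c then pvRunLen c rest + 1 else 0

theorem pvRunLen_le (c : Char) (cs : List Char) : pvRunLen c cs ≤ cs.length := by
  induction cs with
  | nil => simp [pvRunLen]
  | cons x rest ih =>
    simp only [pvRunLen]
    split
    · simp; omega
    · simp

theorem pvRunLen_get (c : Char) (cs : List Char) : ∀ j, j < pvRunLen c cs → cs[j]? = some c := by
  induction cs with
  | nil => simp [pvRunLen]
  | cons x rest ih =>
    intro j hj
    simp only [pvRunLen] at hj
    split at hj
    · subst ‹x = c›
      cases j with
      | zero => simp
      | succ j' => simpa using ih j' (by omega)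
    · omega

theorem pvRunLen_boundary (c : Char) (cs : List Char) : cs[pvRunLen c cs]? ≠ some c := by
  induction cs with
  | nil => simp [pvRunLen]
  | cons x rest ih =>
    simp only [pvRunLen]
    split
    · simpa using ih
    · simpa using ‹¬ x = c›

theorem pvInnerA_eq (c : Char) (cs : List Char) (i : Int) :
    pvInnerA c cs i = (i + pvRunLen c cs, cs.drop (pvRunLen c cs)) := by
  induction cs generalizing i with
  | nil => simp [pvInnerA, pvRunLen]
  | cons x rest ih =>
    simp only [pvInnerA, pvRunLen]
    split
    · rw [ih]
      simp only [List.drop_succ_cons, Prod.mk.injEq, and_true]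
      push_cast
      ring
    · simp

-- the maximal runs as (start, end, char) with Nat indices starting at 0
def pvGroupsN : List Char → List (Nat × Nat × Char)
  | [] => []
  | c :: rest =>
    let k := pvRunLen c rest
    (0, k, c) :: (pvGroupsN (rest.drop k)).map (fun g => (g.1 + (k+1), g.2.1 + (k+1), g.2.2))
termination_by cs => cs.length
decreasing_by simp only [List.length_cons, List.length_drop]; omega

-- the run starts, recursively
def pvRunStarts : List Char → List Nat
  | [] => []
  | c :: rest =>
    let k := pvRunLen c rest
    0 :: (pvRunStarts (rest.drop k)).map (· + (k+1))
termination_by cs => cs.length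
decreasing_by simp only [List.length_cons, List.length_drop]; omega

theorem pvStarts_eq (cs : List Char) : pvStarts cs = pvRunStarts cs := by
  induction hn : cs.length using Nat.strong_induction_on generalizing cs with
  | _ n ih =>
    match cs with
    | [] => simp [pvStarts, pvRunStarts]
    | c :: rest =>
      have hkle := pvRunLen_le c rest
      have hlt : (rest.drop (pvRunLen c rest)).length < n := by
        subst hn; simp only [List.length_cons, List.length_drop]; omega
      have hIH := ih _ hlt _ rfl
      have hm : (rest.drop (pvRunLen c rest)).length = rest.length - pvRunLen c rest := by
        simp
      rw [pvRunStarts]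
      simp only [← hIH]
      unfold pvStarts
      rw [hm]
      have hlen : (c :: rest).length =
          (pvRunLen c rest + 1) + (rest.length - pvRunLen c rest) := by
        simp only [List.length_cons]; omega
      rw [hlen, List.range_add, List.filter_append]
      -- first block: only index 0 survives
      have h1 : (List.range (pvRunLen c rest + 1)).filter
          (fun i => i == 0 || (c :: rest)[i]? != (c :: rest)[i-1]?) = [0] := by
        rw [List.range_succ_eq_map, List.filter_cons, List.filter_map]
        have hnil : (List.range (pvRunLen c rest)).filter
            ((fun i => i == 0 || (c :: rest)[i]? != (c :: rest)[i-1]?) ∘ Nat.succ) = [] := by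
          apply List.filter_eq_nil_iff.mpr
          intro j hj
          have hjk : j < pvRunLen c rest := List.mem_range.mp hj
          have hcur : (c :: rest)[j+1]? = some c := by
            rw [List.getElem?_cons_succ]; exact pvRunLen_get c rest j hjk
          have hprev : (c :: rest)[j]? = some c := by
            cases j with
            | zero => simp
            | succ j' =>
              rw [List.getElem?_cons_succ]
              exact pvRunLen_get c rest j' (by omega)
          simp [Function.comp, hcur, hprev]
        rw [hnil]
        simp
      rw [h1]
      -- second block: shifted copy of the predicate on the dropped suffix
      have h2 : ∀ j ∈ List.range (rest.length - pvRunLen c rest),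
          ((fun i => i == 0 || (c :: rest)[i]? != (c :: rest)[i-1]?) ∘
            (fun x => pvRunLen c rest + 1 + x)) j
          = (fun i => i == 0 ||
              (rest.drop (pvRunLen c rest))[i]? != (rest.drop (pvRunLen c rest))[i-1]?) j := by
        intro j hj
        have hjm : j < rest.length - pvRunLen c rest := List.mem_range.mp hj
        cases j with
        | zero =>
          have hcur : (c :: rest)[pvRunLen c rest + 1 + 0]? = rest[pvRunLen c rest]? := by
            rw [show pvRunLen c rest + 1 + 0 = pvRunLen c rest + 1 by omega,
              List.getElem?_cons_succ]
          have hprev : (c :: rest)[pvRunLen c rest + 1 + 0 - 1]? = some c := by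
            rw [show pvRunLen c rest + 1 + 0 - 1 = pvRunLen c rest by omega]
            cases hk : pvRunLen c rest with
            | zero => simp
            | succ k' =>
              rw [List.getElem?_cons_succ]
              exact pvRunLen_get c rest k' (by omega)
          have hne : (rest[pvRunLen c rest]? != some c) = true :=
            bne_iff_ne.mpr (pvRunLen_boundary c rest)
          simp only [Function.comp_apply, hcur, hprev]
          simp [hne]
        | succ j' =>
          have e1 : pvRunLen c rest + 1 + (j' + 1) = (pvRunLen c rest + (j' + 1)) + 1 := by omega
          have e3 : pvRunLen c rest + (j' + 1) = (pvRunLen c rest + j') + 1 := by omega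
          simp only [Function.comp_apply, e1, Nat.add_sub_cancel, e3,
            List.getElem?_cons_succ, List.getElem?_drop]
          simp
      rw [List.filter_map, List.filter_congr h2]
      simp [Nat.add_comm]

theorem pvZipShift (T : List Nat) (a L : Nat) :
    ((0 + a) :: T.map (· + a)).zip (T.map (· + a) ++ [L + a]) =
      ((0 :: T).zip (T ++ [L])).map (Prod.map (· + a) (· + a)) := by
  rw [show (0 + a) :: T.map (· + a) = (0 :: T).map (· + a) from by simp,
    show T.map (· + a) ++ [L + a] = (T ++ [L]).map (· + a) from by simp,
    List.zip_map]

theorem pvZip_eq (cs : List Char) :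
    (pvRunStarts cs).zip ((pvRunStarts cs).drop 1 ++ [cs.length]) =
      (pvGroupsN cs).map (fun g => (g.1, g.2.1 + 1)) := by
  induction hn : cs.length using Nat.strong_induction_on generalizing cs with
  | _ n ih =>
    match cs with
    | [] => simp [pvRunStarts, pvGroupsN]
    | c :: rest =>
      have hkle := pvRunLen_le c rest
      have hlt : (rest.drop (pvRunLen c rest)).length < n := by
        subst hn; simp only [List.length_cons, List.length_drop]; omega
      have hIH := ih _ hlt _ rfl
      rw [pvRunStarts, pvGroupsN]
      match hcs' : rest.drop (pvRunLen c rest) with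
      | [] =>
        have hrl : rest.length = pvRunLen c rest := by
          have := congrArg List.length hcs'
          simp only [List.length_drop, List.length_nil] at this
          omega
        simp only [pvRunStarts, List.length_cons, hrl] at hn ⊢
        simp [pvGroupsN]
        omega
      | d :: r' =>
        rw [hcs'] at hIH
        have hn' : n = r'.length + 1 + (pvRunLen c rest + 1) := by
          have h := congrArg List.length hcs'
          have hd : (List.drop (pvRunLen c rest) rest).length =
              rest.length - pvRunLen c rest := by simp
          simp only [List.length_cons] at h hn
          omega
        obtain ⟨T, hT⟩ : ∃ T, pvRunStarts (d :: r') = 0 :: T :=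
          ⟨_, by rw [pvRunStarts]⟩
        rw [hT] at hIH
        rw [hT]
        have hIH' : (0 :: T).zip (T ++ [r'.length + 1]) =
            (pvGroupsN (d :: r')).map (fun g => (g.1, g.2.1 + 1)) := by
          simpa using hIH
        simp only [List.map_cons, List.cons_append, List.zip_cons_cons,
          List.drop_succ_cons, List.drop_zero]
        congr 1
        · norm_num
        · rw [hn', pvZipShift T (pvRunLen c rest + 1) (r'.length + 1), hIH',
            List.map_map, List.map_map]
          apply List.map_congr_left
          intro g _
          simp only [Function.comp_apply, Prod.map_apply, Prod.mk.injEq]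
          constructor
          · trivial
          · omega

theorem pvGroupsN_char (cs : List Char) : ∀ g ∈ pvGroupsN cs, cs[g.1]? = some g.2.2 := by
  induction hn : cs.length using Nat.strong_induction_on generalizing cs with
  | _ n ih =>
    match cs with
    | [] => simp [pvGroupsN]
    | c :: rest =>
      have hlt : (rest.drop (pvRunLen c rest)).length < n := by
        subst hn; simp only [List.length_cons, List.length_drop]; omega
      intro g hg
      rw [pvGroupsN] at hg
      simp only [List.mem_cons, List.mem_map] at hg
      rcases hg with rfl | ⟨g', hg', rfl⟩
      · simp
      · have e : g'.1 + (pvRunLen c rest + 1) = (pvRunLen c rest + g'.1) + 1 := by omega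
        simp only [e, List.getElem?_cons_succ]
        rw [← List.getElem?_drop]
        exact ih _ hlt _ rfl g' hg'

-- A-side: outer loop equals filtered/mapped groups (Int offset i)
theorem pvOuterA_eq_groups (M : Int) (cs : List Char) (i : Int) :
    pvOuterA M cs i =
      ((pvGroupsN cs).filter (fun g => ((g.2.1 : Int) - (g.1 : Int) + 1 ≥ M))).map
        (fun g => (i + g.1, i + g.2.1, String.ofList [g.2.2])) := by
  induction hn : cs.length using Nat.strong_induction_on generalizing cs i with
  | _ n ih =>
    match cs with
    | [] => simp [pvOuterA, pvGroupsN]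
    | c :: rest =>
      rw [pvOuterA, pvGroupsN]
      simp only [pvInnerA_eq, pvRunLen, if_true, List.drop_succ_cons]
      have hlt : (rest.drop (pvRunLen c rest)).length < n := by
        subst hn; simp only [List.length_cons, List.length_drop]; omega
      rw [ih _ hlt _ _ rfl]
      have hfc : ∀ (g : Nat × Nat × Char),
          ((fun g : Nat × Nat × Char => decide ((g.2.1:Int) - (g.1:Int) + 1 ≥ M)) ∘
            (fun g : Nat × Nat × Char =>
              (g.1 + (pvRunLen c rest + 1), g.2.1 + (pvRunLen c rest + 1), g.2.2))) g
          = decide ((g.2.1:Int) - (g.1:Int) + 1 ≥ M) := by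
        intro g
        simp only [Function.comp_apply]
        apply decide_eq_decide.mpr
        push_cast
        omega
      rw [List.filter_cons, List.filter_map, List.filter_congr (fun g _ => hfc g)]
      by_cases hM : ((pvRunLen c rest : Int) + 1 ≥ M)
      · rw [if_pos (by push_cast; omega), if_pos (by simp only [decide_eq_true_eq]; push_cast; omega)]
        simp only [List.map_cons, List.map_map, List.singleton_append]
        congr 1
        · simp only [Prod.mk.injEq]
          refine ⟨by push_cast; ring, by push_cast; ring, trivial⟩
        · apply List.map_congr_left
          intro g _
          simp only [Function.comp_apply, Prod.mk.injEq]
          refine ⟨by push_cast; ring, by push_cast; ring, trivial⟩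
      · rw [if_neg (by push_cast; omega), if_neg (by simp only [decide_eq_true_eq]; push_cast; omega)]
        simp only [List.map_map, List.nil_append]
        apply List.map_congr_left
        intro g _
        simp only [Function.comp_apply, Prod.mk.injEq]
        refine ⟨by push_cast; ring, by push_cast; ring, trivial⟩

-- ===== VERDICT (by name: the statement is the Claim_ definition above) =====
theorem find_all_runs_spec : Claim_equal_find_all_runs := by
  intro s M _ _
  unfold Spec_find_all_runs find_all_runs find_all_runs_alt
  simp only []
  rw [pvOuterA_eq_groups, pvStarts_eq, pvZip_eq, List.filter_map, List.map_map]
  have hq : ∀ g ∈ pvGroupsN s.toList,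
      ((fun p : Nat × Nat => decide ((p.2 : Int) - (p.1 : Int) ≥ M)) ∘
        (fun g : Nat × Nat × Char => (g.1, g.2.1 + 1))) g
      = decide ((g.2.1 : Int) - (g.1 : Int) + 1 ≥ M) := by
    intro g _
    simp only [Function.comp_apply]
    apply decide_eq_decide.mpr
    push_cast
    omega
  rw [List.filter_congr hq]
  apply List.map_congr_left
  intro g hg
  have hc := pvGroupsN_char s.toList g (List.mem_of_mem_filter hg)
  simp only [Function.comp_apply, hc, Option.getD_some, Prod.mk.injEq]
  refine ⟨by ring, by push_cast; ring, trivial⟩
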